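-- pv_equiv track=rewrite | github.com/palbiren/agentic-coding-tools | .agents/skills/refresh-architecture/scripts/affected_tests.py | _resolve_changed_to_node_ids
-- ===== SOURCE A (Python) =====
-- def _normalize_path(raw: str) -> str:
--     """Strip leading ./ and collapse redundant separators for comparison."""
--     p = raw.strip()
--     if p.startswith("./"):
--         p = p[2:]
--     return p
--
-- def _resolve_changed_to_node_ids(
--     changed_files: list[str],
--     file_index: dict[str, list[str]],
-- ) -> set[str]:
--     """Map file paths to graph node ids, tolerating prefix differences."""
--     out: set[str] = set()
--     changed_norm = [_normalize_path(p) for p in changed_files]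
--     for changed in changed_norm:
--         # 1. Exact match
--         if changed in file_index:
--             out.update(file_index[changed])
--             continue
--         # 2. Suffix match (changed file path ends with indexed path, or vice versa)
--         for indexed_path, node_ids in file_index.items():
--             if changed.endswith(indexed_path) or indexed_path.endswith(changed):
--                 out.update(node_ids)
--     return out
-- ===== SOURCE B (Python) =====
-- def _resolve_changed_to_node_ids(
--     changed_files: list[str],
--     file_index: dict[str, list[str]],
-- ) -> set[str]:
--     """Map file paths to graph node ids, tolerating prefix differences.
--
--     Instead of scanning the whole index for every changed file, build two
--     hash indexes once: exact_pos (indexed path -> positions) and suf_pos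
--     (every suffix of an indexed path -> positions).  A changed path then
--     resolves with dictionary lookups only.
--     """
--     items = list(file_index.items())
--     exact_pos: dict[str, list[int]] = {}
--     for p, i in [(p, i) for i, (p, _ids) in enumerate(items)]:
--         exact_pos.setdefault(p, []).append(i)
--     suf_pos: dict[str, list[int]] = {}
--     for s, i in [(p[j:], i) for i, (p, _ids) in enumerate(items)
--                  for j in range(len(p) + 1)]:
--         suf_pos.setdefault(s, []).append(i)
--     out: set[str] = set()
--     for raw in changed_files:
--         changed = raw.strip()
--         if changed.startswith("./"):
--             changed = changed[2:]
--         if changed in file_index: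
--             out.update(file_index[changed])
--             continue
--         # indexed_path.endswith(changed): changed is a stored suffix
--         raw_pos = list(suf_pos.get(changed, []))
--         # changed.endswith(indexed_path): some suffix of changed is a stored path
--         for j in range(len(changed) + 1):
--             raw_pos += exact_pos.get(changed[j:], [])
--         for i in sorted(set(raw_pos)):
--             out.update(items[i][1])
--     return out
-- ===== Notes on version B (the rewrite author's own statement) =====
-- stated objective: faster
-- what changed: B replaces A's inner scan of the whole file index per changed file with two hash indexes built once (indexed path -> positions, every suffix of an indexed path -> positions), so each changed file resolves by dictionary lookups on its own suffixes; matched positions are sorted to reproduce A's index order.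
import Mathlib
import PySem

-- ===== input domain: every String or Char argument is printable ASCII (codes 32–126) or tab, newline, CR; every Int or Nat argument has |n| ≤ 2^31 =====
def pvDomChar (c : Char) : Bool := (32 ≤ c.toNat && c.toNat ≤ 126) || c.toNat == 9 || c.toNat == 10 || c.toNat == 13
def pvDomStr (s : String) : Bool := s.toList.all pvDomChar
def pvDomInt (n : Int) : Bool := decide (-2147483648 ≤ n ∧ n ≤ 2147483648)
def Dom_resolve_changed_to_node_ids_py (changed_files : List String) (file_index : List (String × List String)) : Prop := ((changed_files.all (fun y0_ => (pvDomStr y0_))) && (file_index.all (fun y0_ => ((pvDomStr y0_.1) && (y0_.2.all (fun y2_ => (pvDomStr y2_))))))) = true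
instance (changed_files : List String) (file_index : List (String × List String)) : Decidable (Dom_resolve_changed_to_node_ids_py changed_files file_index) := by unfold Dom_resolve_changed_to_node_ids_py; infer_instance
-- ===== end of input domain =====

-- B builds two hash indexes over the file index once (path -> positions, every suffix of a path -> positions)
-- so each changed file resolves by dictionary lookups instead of scanning the whole index; same return value.


-- ===== PORT A =====
def pyNormalizePath (raw : String) : String :=
  let p := PySem.Str.strip raw
  if PySem.Str.startswith p "./" then PySem.Str.slice p (some 2) none else p

def resolve_changed_to_node_ids_py (changed_files : List String) (file_index : List (String × List String)) : List String :=
  let fi := PySem.Dict.ofList file_index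
  let changed_norm := changed_files.map pyNormalizePath
  changed_norm.foldl (fun out changed =>
    if fi.contains changed then PySem.Set.update out (fi.getD changed [])
    else fi.items.foldl (fun out q =>
      if PySem.Str.endswith changed q.1 || PySem.Str.endswith q.1 changed then
        PySem.Set.update out q.2
      else out) out)
    PySem.Set.empty

-- ===== PORT B ===== (shares the path-normalization helper with port A)
-- exact_pos: indexed path -> list of positions holding exactly that path
def altExactPos (items : List (String × List String)) : PySem.Dict String (List Int) :=
  ((PySem.List.enumerate items).map (fun q => (q.2.1, q.1))).foldl
    (fun d pr => d.modify pr.1 [] (· ++ [pr.2])) PySem.Dict.empty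

-- suf_pos: every suffix s[j:] of an indexed path -> list of positions of paths having that suffix
def altSufPos (items : List (String × List String)) : PySem.Dict String (List Int) :=
  ((PySem.List.enumerate items).flatMap (fun q =>
      (PySem.List.pyRange 0 (PySem.Str.len q.2.1 + 1) 1).map
        (fun j => (PySem.Str.slice q.2.1 (some j) none, q.1)))).foldl
    (fun d pr => d.modify pr.1 [] (· ++ [pr.2])) PySem.Dict.empty

def resolve_changed_to_node_ids_py_alt (changed_files : List String) (file_index : List (String × List String)) : List String :=
  let fi := PySem.Dict.ofList file_index
  let items := fi.items
  let exactPos := altExactPos items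
  let sufPos := altSufPos items
  changed_files.foldl (fun out raw =>
    let changed := pyNormalizePath raw
    if fi.contains changed then PySem.Set.update out (fi.getD changed [])
    else
      let rawPos := (PySem.List.pyRange 0 (PySem.Str.len changed + 1) 1).foldl
        (fun acc j => acc ++ exactPos.getD (PySem.Str.slice changed (some j) none) [])
        (sufPos.getD changed [])
      (PySem.List.sorted (PySem.Set.ofList rawPos) (fun i => i)).foldl
        (fun out i => PySem.Set.update out ((PySem.List.pyGetD items i ("", ([] : List String))).2)) out)
    PySem.Set.empty

-- ===== PRECONDITION & SPEC =====
def Spec_resolve_changed_to_node_ids_py (changed_files : List String) (file_index : List (String × List String)) (out : List String) : Prop := out = resolve_changed_to_node_ids_py_alt changed_files file_index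
instance (changed_files : List String) (file_index : List (String × List String)) (out : List String) : Decidable (Spec_resolve_changed_to_node_ids_py changed_files file_index out) := by unfold Spec_resolve_changed_to_node_ids_py; infer_instance

-- ===== CLAIM (what is proved, stated in full; the proofs are below) =====
def Claim_equal_resolve_changed_to_node_ids_py : Prop := ∀ (changed_files : List String) (file_index : List (String × List String)), Dom_resolve_changed_to_node_ids_py changed_files file_index → Spec_resolve_changed_to_node_ids_py changed_files file_index (resolve_changed_to_node_ids_py changed_files file_index)

-- ===== LEMMAS AND PROOFS =====

theorem mem_suffix_slices (p c : String) :
    (∃ j, j ∈ PySem.List.pyRange 0 (PySem.Str.len p + 1) 1 ∧ PySem.Str.slice p (some j) none = c)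
      ↔ PySem.Str.endswith p c = true := by
  rw [PySem.Str.endswith_eq, PySem.Chars.endswith_iff]
  constructor
  · rintro ⟨j, hj, hs⟩
    rw [PySem.List.mem_pyRange_one] at hj
    have hc : c.toList = p.toList.drop j.toNat := by
      rw [← hs]
      rw [PySem.Str.toList_slice, PySem.Chars.slice_eq_listSlice, PySem.List.slice_from _ hj.1]
    rw [hc]
    exact List.drop_suffix _ _
  · intro h
    refine ⟨((p.toList.length - c.toList.length : Nat) : Int), ?_, ?_⟩
    · rw [PySem.List.mem_pyRange_one, PySem.Str.len_eq]
      constructor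
      · exact Int.natCast_nonneg _
      · have := Nat.sub_le p.toList.length c.toList.length
        omega
    · rw [← String.toList_inj, PySem.Str.toList_slice, PySem.Chars.slice_eq_listSlice,
        PySem.List.slice_from _ (Int.natCast_nonneg _), Int.toNat_natCast]
      exact (List.suffix_iff_eq_drop.mp h).symm

theorem mem_rawPos (items : List (String × List String)) (c : String) (i : Int) :
    (i ∈ (PySem.List.pyRange 0 (PySem.Str.len c + 1) 1).foldl
        (fun acc j => acc ++ (altExactPos items).getD (PySem.Str.slice c (some j) none) [])
        ((altSufPos items).getD c []))
      ↔ ∃ k : Nat, ∃ _h : k < items.length, i = (k : Int) ∧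
          (PySem.Str.endswith c (items[k].1) || PySem.Str.endswith (items[k].1) c) = true := by
  rw [PySem.List.foldl_append_eq_flatMap]
  unfold altSufPos altExactPos
  simp only [PySem.Dict.getD_foldl_modify_append, PySem.Dict.getD_empty, List.nil_append,
    List.mem_append, List.mem_map, List.mem_filter, List.mem_flatMap,
    PySem.List.mem_enumerate_iff, beq_iff_eq]
  constructor
  · rintro (⟨pr, ⟨⟨q, ⟨k, hk, rfl⟩, j, hj, rfl⟩, hc⟩, hi⟩ | ⟨j, hj, pr, ⟨⟨q, ⟨k, hk, rfl⟩, rfl⟩, hps⟩, hi⟩)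
    · refine ⟨k, hk, by simpa using hi.symm, ?_⟩
      have h2 := (mem_suffix_slices items[k].1 c).mp ⟨j, hj, hc⟩
      exact Bool.or_eq_true_iff.mpr (Or.inr h2)
    · refine ⟨k, hk, by simpa using hi.symm, ?_⟩
      have h1 := (mem_suffix_slices c items[k].1).mp ⟨j, hj, hps.symm⟩
      exact Bool.or_eq_true_iff.mpr (Or.inl h1)
  · rintro ⟨k, hk, rfl, hP⟩
    rcases Bool.or_eq_true_iff.mp hP with h1 | h2
    · obtain ⟨j, hj, hs⟩ := (mem_suffix_slices c items[k].1).mpr h1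
      refine Or.inr ⟨j, hj, (items[k].1, (0:Int) + (k:Int)), ⟨⟨((0:Int) + (k:Int), items[k]), ⟨k, hk, rfl⟩, rfl⟩, hs.symm⟩, by simp⟩
    · obtain ⟨j, hj, hs⟩ := (mem_suffix_slices items[k].1 c).mpr h2
      refine Or.inl ⟨(PySem.Str.slice items[k].1 (some j), (0:Int) + (k:Int)), ⟨⟨((0:Int) + (k:Int), items[k]), ⟨k, hk, rfl⟩, j, hj, rfl⟩, hs⟩, by simp⟩

theorem inner_eq (items : List (String × List String)) (c : String) (out : PySem.Set String) :
    (PySem.List.sorted (PySem.Set.ofList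
        ((PySem.List.pyRange 0 (PySem.Str.len c + 1) 1).foldl
          (fun acc j => acc ++ (altExactPos items).getD (PySem.Str.slice c (some j) none) [])
          ((altSufPos items).getD c []))) (fun i => i)).foldl
      (fun out i => PySem.Set.update out ((PySem.List.pyGetD items i ("", ([] : List String))).2)) out
    = items.foldl (fun out q =>
        if PySem.Str.endswith c q.1 || PySem.Str.endswith q.1 c then
          PySem.Set.update out q.2
        else out) out := by
  have hpw : ((PySem.List.pyRange 0 (PySem.List.len items) 1).filter
      (fun i => PySem.Str.endswith c (PySem.List.pyGetD items i ("", ([] : List String))).1 ||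
        PySem.Str.endswith (PySem.List.pyGetD items i ("", ([] : List String))).1 c)).Pairwise (· < ·) :=
    (PySem.List.pairwise_lt_pyRange_one 0 _).filter _
  have hnd := hpw.imp (fun h => ne_of_lt h)
  have hmem : ∀ a : Int, a ∈ ((PySem.List.pyRange 0 (PySem.List.len items) 1).filter
      (fun i => PySem.Str.endswith c (PySem.List.pyGetD items i ("", ([] : List String))).1 ||
        PySem.Str.endswith (PySem.List.pyGetD items i ("", ([] : List String))).1 c)) ↔
      a ∈ PySem.Set.ofList
        ((PySem.List.pyRange 0 (PySem.Str.len c + 1) 1).foldl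
          (fun acc j => acc ++ (altExactPos items).getD (PySem.Str.slice c (some j) none) [])
          ((altSufPos items).getD c [])) := by
    intro a
    rw [PySem.Set.mem_ofList, mem_rawPos, List.mem_filter, PySem.List.mem_pyRange_one,
      PySem.List.len_eq]
    constructor
    · rintro ⟨⟨h0, h1⟩, hPa⟩
      have h1' : a.toNat < items.length := by omega
      refine ⟨a.toNat, h1', by omega, ?_⟩
      rwa [PySem.List.pyGetD_eq_getElem items _ h0 (by omega)] at hPa
    · rintro ⟨k, hk, rfl, hPk⟩
      refine ⟨⟨Int.natCast_nonneg _, by exact_mod_cast hk⟩, ?_⟩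
      rw [PySem.List.pyGetD_eq_getElem items _ (Int.natCast_nonneg _) (by exact_mod_cast hk)]
      simpa using hPk
  have hs := PySem.List.sorted_eq_of_perm_of_pairwise_lt
    (PySem.Set.ofList
        ((PySem.List.pyRange 0 (PySem.Str.len c + 1) 1).foldl
          (fun acc j => acc ++ (altExactPos items).getD (PySem.Str.slice c (some j) none) [])
          ((altSufPos items).getD c [])))
    ((PySem.List.pyRange 0 (PySem.List.len items) 1).filter
      (fun i => PySem.Str.endswith c (PySem.List.pyGetD items i ("", ([] : List String))).1 ||
        PySem.Str.endswith (PySem.List.pyGetD items i ("", ([] : List String))).1 c))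
    (fun i => i)
    ((List.perm_ext_iff_of_nodup hnd (PySem.Set.nodup_ofList _)).mpr hmem) hpw
  rw [hs, List.foldl_filter]
  exact PySem.List.foldl_pyRange_zero_pyGetD items ("", ([] : List String))
    (fun out q => if PySem.Str.endswith c q.1 || PySem.Str.endswith q.1 c then
      PySem.Set.update out q.2 else out) out

set_option maxHeartbeats 2000000 in
theorem outer_eq (fi : PySem.Dict String (List String)) (l : List String) (out : PySem.Set String) :
    (l.map pyNormalizePath).foldl (fun out changed =>
        if fi.contains changed then PySem.Set.update out (fi.getD changed [])
        else fi.items.foldl (fun out q =>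
          if PySem.Str.endswith changed q.1 || PySem.Str.endswith q.1 changed then
            PySem.Set.update out q.2
          else out) out) out
    = l.foldl (fun out raw =>
        let changed := pyNormalizePath raw
        if fi.contains changed then PySem.Set.update out (fi.getD changed [])
        else
          let rawPos := (PySem.List.pyRange 0 (PySem.Str.len changed + 1) 1).foldl
            (fun acc j => acc ++ (altExactPos fi.items).getD (PySem.Str.slice changed (some j) none) [])
            ((altSufPos fi.items).getD changed [])
          (PySem.List.sorted (PySem.Set.ofList rawPos) (fun i => i)).foldl
            (fun out i => PySem.Set.update out ((PySem.List.pyGetD fi.items i ("", ([] : List String))).2)) out) out := by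
  induction l generalizing out with
  | nil => rfl
  | cons raw t ih =>
    simp only [List.map_cons, List.foldl_cons]
    rw [ih]
    by_cases h : fi.contains (pyNormalizePath raw) = true
    · simp only [h, if_true]
    · simp only [h, Bool.false_eq_true, if_false, inner_eq]

-- ===== VERDICT (by name: the statement is the Claim_ definition above) =====
theorem resolve_changed_to_node_ids_py_spec : Claim_equal_resolve_changed_to_node_ids_py := by
  intro changed_files file_index _
  unfold Spec_resolve_changed_to_node_ids_py
  unfold resolve_changed_to_node_ids_py resolve_changed_to_node_ids_py_alt
  exact outer_eq (PySem.Dict.ofList file_index) changed_files PySem.Set.empty
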